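-- pv_equiv track=rewrite | github.com/pypi-data/pypi-mirror-399 | packages/zotomatic/zotomatic-0.1.1-py3-none-any.whl/zotomatic/utils/pdf.py | extract_authors_candidate_from_text
-- ===== SOURCE A (Python) =====
-- LANG_HEADING_KEYWORDS = {
--     "en": ("abstract", "summary", "introduction", "conclusion", "related work"),
--     "ja": ("概要", "要旨", "序論", "結論", "関連研究"),
--     "zh": ("摘要", "概述", "简介", "结论", "相关工作"),
-- }
--
-- def _looks_like_heading(text: str) -> bool:
--     if len(text.split()) > 12:
--         return False
--     if text.isupper():
--         return True
--     if text.startswith(tuple("0123456789")):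
--         return True
--     if text.lower().startswith(tuple(LANG_HEADING_KEYWORDS["en"])):
--         return True
--     return False
--
-- def extract_authors_candidate_from_text(text: str, max_len: int = 160) -> str:
--     if not text:
--         return ""
--     lines = [line.strip() for line in text.splitlines() if line.strip()]
--     for line in lines[:8]:
--         if _looks_like_heading(line):
--             continue
--         if any(sep in line for sep in (",", " and ", "・")):
--             return line[:max_len]
--     for line in lines[:8]:
--         if _looks_like_heading(line):
--             continue
--         if len(line.split()) <= 2 and line.replace(" ", "").isalpha():
--             return line[:max_len]
--     return lines[0][:max_len] if lines else ""
-- ===== SOURCE B (Python) =====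
-- LANG_HEADING_KEYWORDS = {
--     "en": ("abstract", "summary", "introduction", "conclusion", "related work"),
--     "ja": ("概要", "要旨", "序論", "結論", "関連研究"),
--     "zh": ("摘要", "概述", "简介", "结论", "相关工作"),
-- }
--
-- def _looks_like_heading(text: str) -> bool:
--     if len(text.split()) > 12:
--         return False
--     if text.isupper():
--         return True
--     if text.startswith(tuple("0123456789")):
--         return True
--     if text.lower().startswith(tuple(LANG_HEADING_KEYWORDS["en"])):
--         return True
--     return False
--
-- def extract_authors_candidate_from_text(text: str, max_len: int = 160) -> str:
--     if not text:
--         return ""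
--     lines = [s for s in (ln.strip() for ln in text.splitlines()) if s]
--     sep_candidate = None
--     alpha_candidate = None
--     for line in lines[:8]:
--         if _looks_like_heading(line):
--             continue
--         if sep_candidate is None and ("," in line or " and " in line or "・" in line):
--             sep_candidate = line
--         if alpha_candidate is None and len(line.split()) <= 2 and line.replace(" ", "").isalpha():
--             alpha_candidate = line
--     best = sep_candidate
--     if best is None:
--         best = alpha_candidate
--     if best is None:
--         best = lines[0] if lines else None
--     return best[:max_len] if best is not None else ""
-- ===== Notes on version B (the rewrite author's own statement) =====
-- stated objective: alternative
-- what changed: Replaces A's two sequential scans over lines[:8] (first for separator lines, then for short all-alpha lines) by a single fused pass that records the first qualifying line of each kind in two accumulator variables and picks by priority afterwards.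
import Mathlib
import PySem

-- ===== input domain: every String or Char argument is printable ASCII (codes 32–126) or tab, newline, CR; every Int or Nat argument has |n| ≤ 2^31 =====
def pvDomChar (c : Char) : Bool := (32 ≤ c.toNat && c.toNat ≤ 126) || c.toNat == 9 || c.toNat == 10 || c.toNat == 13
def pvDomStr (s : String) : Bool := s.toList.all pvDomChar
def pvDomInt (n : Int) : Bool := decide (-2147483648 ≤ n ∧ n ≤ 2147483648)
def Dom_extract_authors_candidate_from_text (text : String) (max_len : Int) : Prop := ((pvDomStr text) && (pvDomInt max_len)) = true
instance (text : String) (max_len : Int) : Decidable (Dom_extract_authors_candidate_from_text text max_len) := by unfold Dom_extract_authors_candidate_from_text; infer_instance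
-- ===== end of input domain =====

-- B fuses A's two scans over lines[:8] into one pass keeping two accumulators; alternative decomposition, same cost.

-- ===== PORT A =====
-- str.isupper(): at least one cased char and no lowercase cased char; exact on the ASCII domain (cased = letters).
def pvStrIsupper (cs : List Char) : Bool :=
  cs.any PySem.Chars.isupper && !(cs.any PySem.Chars.islower)

def pvDigitPrefixes : List (List Char) :=
  [['0'], ['1'], ['2'], ['3'], ['4'], ['5'], ['6'], ['7'], ['8'], ['9']]

def pvEnKeywords : List (List Char) :=
  ["abstract".toList, "summary".toList, "introduction".toList, "conclusion".toList, "related work".toList]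

def pvHeading (cs : List Char) : Bool :=
  if 12 < (PySem.Chars.split₀ cs).length then false
  else if pvStrIsupper cs then true
  else if pvDigitPrefixes.any (fun p => PySem.Chars.startswith cs p) then true
  else if pvEnKeywords.any (fun p => PySem.Chars.startswith (PySem.Chars.lower cs) p) then true
  else false

def pvSep (cs : List Char) : Bool :=
  [",".toList, " and ".toList, "・".toList].any (fun sep => PySem.Chars.isIn sep cs)

def pvAlpha (cs : List Char) : Bool :=
  decide ((PySem.Chars.split₀ cs).length ≤ 2) &&
    PySem.Chars.strIsalpha (PySem.Chars.replace cs [' '] [])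

-- first loop of A: first non-heading line containing a separator
def pvLoop1 : List (List Char) → Option (List Char)
  | [] => none
  | l :: ls => if pvHeading l then pvLoop1 ls
               else if pvSep l then some l else pvLoop1 ls

-- second loop of A: first non-heading short all-alpha line
def pvLoop2 : List (List Char) → Option (List Char)
  | [] => none
  | l :: ls => if pvHeading l then pvLoop2 ls
               else if pvAlpha l then some l else pvLoop2 ls

def pvLines (text : String) : List (List Char) :=
  ((PySem.Chars.splitlines text.toList).map PySem.Chars.strip).filter (fun l => !l.isEmpty)

def pvCut (l : List Char) (max_len : Int) : String :=
  String.ofList (PySem.List.slice l none (some max_len))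

def extract_authors_candidate_from_text (text : String) (max_len : Int) : String :=
  if text.toList.isEmpty then ""
  else
    let lines := pvLines text
    let front := PySem.List.slice lines none (some 8)
    match pvLoop1 front with
    | some l => pvCut l max_len
    | none =>
      match pvLoop2 front with
      | some l => pvCut l max_len
      | none =>
        match lines with
        | [] => ""
        | l :: _ => pvCut l max_len

-- ===== PORT B =====
-- one fused pass: first qualifying line of each kind, kept in two accumulators
def pvScan : List (List Char) → Option (List Char) → Option (List Char) →
    Option (List Char) × Option (List Char)
  | [], sepC, alphaC => (sepC, alphaC)
  | l :: ls, sepC, alphaC =>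
    if pvHeading l then pvScan ls sepC alphaC
    else
      pvScan ls
        (if sepC.isNone && pvSep l then some l else sepC)
        (if alphaC.isNone && pvAlpha l then some l else alphaC)

def extract_authors_candidate_from_text_alt (text : String) (max_len : Int) : String :=
  if text.toList.isEmpty then ""
  else
    let lines := pvLines text
    let (sepC, alphaC) := pvScan (lines.take 8) none none
    match (sepC.orElse fun _ => alphaC.orElse fun _ => lines.head?) with
    | some l => pvCut l max_len
    | none => ""

-- ===== PRECONDITION & SPEC =====
def Spec_extract_authors_candidate_from_text (text : String) (max_len : Int) (out : String) : Prop := out = extract_authors_candidate_from_text_alt text max_len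
instance (text : String) (max_len : Int) (out : String) : Decidable (Spec_extract_authors_candidate_from_text text max_len out) := by unfold Spec_extract_authors_candidate_from_text; infer_instance

-- ===== CLAIM (what is proved, stated in full; the proofs are below) =====
def Claim_equal_extract_authors_candidate_from_text : Prop := ∀ (text : String) (max_len : Int), Dom_extract_authors_candidate_from_text text max_len → Spec_extract_authors_candidate_from_text text max_len (extract_authors_candidate_from_text text max_len)

-- ===== LEMMAS AND PROOFS =====
theorem pvScan_eq (ls : List (List Char)) (s a : Option (List Char)) :
    pvScan ls s a = (s.orElse fun _ => pvLoop1 ls, a.orElse fun _ => pvLoop2 ls) := by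
  induction ls generalizing s a with
  | nil => cases s <;> cases a <;> simp [pvScan, pvLoop1, pvLoop2, Option.orElse]
  | cons l ls ih =>
    by_cases h : pvHeading l = true
    · simp [pvScan, pvLoop1, pvLoop2, h, ih]
    · simp only [pvScan, pvLoop1, pvLoop2, h, if_false, ih, Bool.false_eq_true]
      cases s <;> cases a <;> by_cases hs : pvSep l = true <;> by_cases ha : pvAlpha l = true <;>
        simp [hs, ha, Option.orElse]

theorem extract_eq (text : String) (max_len : Int) :
    extract_authors_candidate_from_text text max_len =
      extract_authors_candidate_from_text_alt text max_len := by
  unfold extract_authors_candidate_from_text extract_authors_candidate_from_text_alt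
  by_cases h : text.toList.isEmpty
  · simp [h]
  · simp only [h, if_false, Bool.false_eq_true]
    have hsl : PySem.List.slice (pvLines text) none (some 8) = (pvLines text).take 8 := by
      rw [PySem.List.slice_to _ (by norm_num)]; rfl
    rw [hsl, pvScan_eq]
    cases h1 : pvLoop1 ((pvLines text).take 8) with
    | some l => simp [Option.orElse]
    | none =>
      cases h2 : pvLoop2 ((pvLines text).take 8) with
      | some l => simp [Option.orElse]
      | none =>
        cases hl : pvLines text with
        | nil => simp [Option.orElse]
        | cons x xs => simp [Option.orElse]

-- ===== VERDICT (by name: the statement is the Claim_ definition above) =====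
theorem extract_authors_candidate_from_text_spec : Claim_equal_extract_authors_candidate_from_text := by
  intro text max_len _
  unfold Spec_extract_authors_candidate_from_text
  exact extract_eq text max_len
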